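-- pv_equiv track=rewrite | github.com/pypi-data/pypi-mirror-146 | packages/pymtheg/pymtheg-2.4.0.tar.gz/pymtheg-2.4.0/pymtheg.py | check_timestamp
-- ===== SOURCE A (Python) =====
-- from typing import Iterable, List, Literal, NamedTuple, Optional, Tuple, Union
--
-- class Timestamp(NamedTuple):
--     """
--     timestamp named tuple
--
--     type: Literal[0] | Literal[1]
--         0 if start timestamp; 1 if end timestamp
--     ss: int
--         timestamp in seconds
--     random: bool
--         is timestamp random
--     relative: bool = False
--         is timestamp relative
--     """
--
--     type: Union[Literal[0], Literal[1]]
--     ss: int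
--     random: bool = False
--     relative: bool = False
--
--     def __str__(self) -> str:
--         return ("+" if self.relative else "") + str(self.ss)
--
-- def check_timestamp(type: Union[Literal[0], Literal[1]], ts: str) -> Optional[Timestamp]:
--     """
--     checks timestamps for timestamp retrieval and command line argument validation
--
--     ts: str
--         timestamp string
--     type: Literal[0] | Literal[1]
--         0 if start timestamp; 1 if end timestamp
--
--     returns a Timestamp object if check was successful else None
--     """
--     ts = ts.strip()
--
--     if ts == "*":
--         return Timestamp(type=type, ss=0, random=True)
--
--     elif ts == "-1":
--         return Timestamp(type=type, ss=-1)
--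
--     else:
--         relative: bool
--         if ts.startswith("+"):
--             if type == 0:  # relative timestamps in start timestamp are not allowed
--                 return None
--
--             relative = True
--             ts = ts[1:]
--
--         else:
--             relative = False
--
--         sts = ts.split(":")  # split time stamp (hh:mm:ss)
--         sts.reverse()  # (ss:mm:hh)
--
--         tu_conv = [1, 60, 3600]  # time unit conversion
--         total_ss = 0  # total seconds
--
--         if len(sts) < 4:
--             for tu, tu_c in zip(sts, tu_conv):
--                 if tu.isnumeric():
--                     total_ss += int(tu) * tu_c
--
--                 else:
--                     return None
--
--             return Timestamp(type=type, ss=total_ss, relative=relative)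
--
--         else:
--             return None
-- ===== SOURCE B (Python) =====
-- from typing import Literal, NamedTuple, Optional, Union
--
-- class Timestamp(NamedTuple):
--     type: Union[Literal[0], Literal[1]]
--     ss: int
--     random: bool = False
--     relative: bool = False
--
--     def __str__(self) -> str:
--         return ("+" if self.relative else "") + str(self.ss)
--
-- def check_timestamp(type: Union[Literal[0], Literal[1]], ts: str) -> Optional[Timestamp]:
--     s = ts.strip()
--     if s == "*":
--         return Timestamp(type=type, ss=0, random=True)
--     if s == "-1":
--         return Timestamp(type=type, ss=-1)
--     relative = s[:1] == "+"
--     if relative: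
--         if type == 0:  # relative start timestamps are not allowed
--             return None
--         s = s[1:]
--     # single character-level scan: no split, no reversal, no weight table
--     total = 0
--     cur = ""
--     ncolons = 0
--     for ch in s:
--         if ch == ":":
--             if not cur.isnumeric() or ncolons == 2:
--                 return None
--             total = total * 60 + int(cur)
--             cur = ""
--             ncolons += 1
--         else:
--             cur += ch
--     if not cur.isnumeric():
--         return None
--     return Timestamp(type=type, ss=total * 60 + int(cur), relative=relative)
-- ===== Notes on version B (the rewrite author's own statement) =====
-- stated objective: alternative
-- what changed: Replaces A's split-on-':' / list-reverse / [1,60,3600] weight-table zip loop with a single character-level scan that accumulates each component and folds a base-60 total directly (no split, no reversal, no weight table).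
import Mathlib
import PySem

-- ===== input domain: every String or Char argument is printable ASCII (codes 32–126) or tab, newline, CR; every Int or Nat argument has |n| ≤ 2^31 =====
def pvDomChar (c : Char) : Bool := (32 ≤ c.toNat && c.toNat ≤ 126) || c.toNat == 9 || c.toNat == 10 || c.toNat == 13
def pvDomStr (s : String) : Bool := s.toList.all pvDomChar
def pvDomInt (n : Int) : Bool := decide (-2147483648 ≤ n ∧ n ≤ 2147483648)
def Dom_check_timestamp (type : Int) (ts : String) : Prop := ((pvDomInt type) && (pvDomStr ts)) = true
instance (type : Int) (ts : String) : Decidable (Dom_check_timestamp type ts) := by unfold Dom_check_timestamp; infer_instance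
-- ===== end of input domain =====

-- B replaces A's split/reverse/[1,60,3600]-weight-table pipeline with one character-level scan
-- that accumulates a base-60 total directly (no split, no reversal, no weight table): alternative decomposition.


-- ===== PORT A =====
-- A's for-loop over zip(sts, tu_conv) with early return None; '.isnumeric()' is ported as
-- strIsdigit (exact on the printable-ASCII domain); int(tu) after the digit check always parses.
def aLoop : List (String × Int) → Int → Option Int
  | [], acc => some acc
  | (tu, c) :: rest, acc =>
    if PySem.Str.strIsdigit tu then aLoop rest (acc + (PySem.Int.ofStr? tu).getD 0 * c)
    else none

def check_timestamp (type : Int) (ts : String) : Option (Int × Int × Bool × Bool) :=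
  let ts := PySem.Str.strip ts
  if ts = "*" then some (type, 0, true, false)
  else if ts = "-1" then some (type, -1, false, false)
  else
    let pr : Option (Bool × String) :=
      if PySem.Str.startswith ts "+" then
        if type = 0 then none
        else some (true, PySem.Str.slice ts (some 1) none)
      else some (false, ts)
    match pr with
    | none => none
    | some (relative, ts) =>
      -- ts.split(":") with a nonempty separator never raises: split? returns some
      let sts := ((PySem.Str.split? ts ":").getD []).reverse
      if sts.length < 4 then
        match aLoop (sts.zip [1, 60, 3600]) 0 with
        | none => none
        | some total_ss => some (type, total_ss, false, relative)
      else none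

-- ===== PORT B =====
-- Source B's single character scan over the (stripped, '+'-less) string: 'cur' collects the current
-- component's characters, 'total' is the base-60 fold so far, 'nc' counts colons seen.
-- '.isnumeric()' is ported as strIsdigit, int(cur) as ofChars? (exact on the printable-ASCII domain).
def bScan (type : Int) (rel : Bool) : List Char → Int → List Char → Nat → Option (Int × Int × Bool × Bool)
  | [], total, cur, _ =>
    if PySem.Chars.strIsdigit cur then
      some (type, total * 60 + (PySem.Int.ofChars? cur).getD 0, false, rel)
    else none
  | c :: rest, total, cur, nc =>
    if c = ':' then
      if !PySem.Chars.strIsdigit cur || nc == 2 then none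
      else bScan type rel rest (total * 60 + (PySem.Int.ofChars? cur).getD 0) [] (nc + 1)
    else bScan type rel rest total (cur ++ [c]) nc

def check_timestamp_alt (type : Int) (ts : String) : Option (Int × Int × Bool × Bool) :=
  let cs := PySem.Chars.strip ts.toList
  if cs = ['*'] then some (type, 0, true, false)
  else if cs = ['-', '1'] then some (type, -1, false, false)
  else if cs.take 1 = ['+'] then          -- s[:1] == "+"
    if type = 0 then none                  -- relative start timestamps are not allowed
    else bScan type true cs.tail 0 [] 0
  else bScan type false cs 0 [] 0

-- ===== PRECONDITION & SPEC =====
def Spec_check_timestamp (type : Int) (ts : String) (out : Option (Int × Int × Bool × Bool)) : Prop := out = check_timestamp_alt type ts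
instance (type : Int) (ts : String) (out : Option (Int × Int × Bool × Bool)) : Decidable (Spec_check_timestamp type ts out) := by unfold Spec_check_timestamp; infer_instance

-- ===== CLAIM (what is proved, stated in full; the proofs are below) =====
def Claim_equal_check_timestamp : Prop := ∀ (type : Int) (ts : String), Dom_check_timestamp type ts → Spec_check_timestamp type ts (check_timestamp type ts)

-- ===== LEMMAS AND PROOFS =====

-- a structural characterisation of s.split(":") at the character level
def consH (x : List Char) : List (List Char) → List (List Char)
  | [] => [x]
  | y :: ys => (x ++ y) :: ys

def splitCh : List Char → List (List Char)
  | [] => [[]]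
  | c :: r => if c = ':' then [] :: splitCh r else consH [c] (splitCh r)

theorem consH_ne_nil (x : List Char) (L : List (List Char)) : consH x L ≠ [] := by
  cases L <;> simp [consH]

theorem splitCh_ne_nil (cs : List Char) : splitCh cs ≠ [] := by
  cases cs with
  | nil => simp [splitCh]
  | cons c r =>
    simp only [splitCh]
    split
    · simp
    · exact consH_ne_nil _ _

theorem consH_consH (x y : List Char) (L : List (List Char)) :
    consH x (consH y L) = consH (x ++ y) L := by
  cases L <;> simp [consH]

theorem go_spec (fuel : Nat) : ∀ (l cur : List Char) (acc : List (List Char)),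
    l.length ≤ fuel →
    PySem.Chars.splitOn.go [':'] fuel l cur acc = acc.reverse ++ consH cur.reverse (splitCh l) := by
  induction fuel with
  | zero =>
    intro l cur acc h
    have : l = [] := by cases l <;> simp_all
    subst this
    simp [PySem.Chars.splitOn.go, splitCh, consH]
  | succ n ih =>
    intro l cur acc h
    cases l with
    | nil => simp [PySem.Chars.splitOn.go, splitCh, consH]
    | cons c rest =>
      rw [PySem.Chars.splitOn.go]
      by_cases hc : c = ':'
      · subst hc
        have hpre : [':'].isPrefixOf (':' :: rest) = true := by simp [List.isPrefixOf]
        rw [if_pos hpre]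
        have hd : List.drop [':'].length (':' :: rest) = rest := by simp
        simp only [List.length_cons] at h
        rw [hd, ih _ _ _ (by omega)]
        obtain ⟨p, ps, hps⟩ := List.exists_cons_of_ne_nil (splitCh_ne_nil rest)
        simp [splitCh, consH, hps]
      · have hpre : [':'].isPrefixOf (c :: rest) = false := by
          simp [List.isPrefixOf]; exact fun h' => hc h'.symm
        rw [if_neg (by simp [hpre])]
        simp only [List.length_cons] at h
        rw [ih _ _ _ (by omega)]
        simp [splitCh, hc, consH_consH]

theorem splitOn_colon (cs : List Char) : PySem.Chars.splitOn cs [':'] = splitCh cs := by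
  unfold PySem.Chars.splitOn
  rw [go_spec _ _ _ _ (by omega)]
  obtain ⟨p, ps, hps⟩ := List.exists_cons_of_ne_nil (splitCh_ne_nil cs)
  simp [hps, consH]

-- B's scan, restated over the colon-split components
def K (type : Int) (rel : Bool) : List (List Char) → Int → List Char → Nat → Option (Int × Int × Bool × Bool)
  | [], _, _, _ => none
  | [p], t, cur, _ =>
    if PySem.Chars.strIsdigit (cur ++ p) then
      some (type, t * 60 + (PySem.Int.ofChars? (cur ++ p)).getD 0, false, rel)
    else none
  | p :: q :: ps, t, cur, nc =>
    if !PySem.Chars.strIsdigit (cur ++ p) || nc == 2 then none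
    else K type rel (q :: ps) (t * 60 + (PySem.Int.ofChars? (cur ++ p)).getD 0) [] (nc + 1)

theorem K_single (type : Int) (rel : Bool) (p : List Char) (t : Int) (cur : List Char) (nc : Nat) :
    K type rel [p] t cur nc
    = if PySem.Chars.strIsdigit (cur ++ p) then
        some (type, t * 60 + (PySem.Int.ofChars? (cur ++ p)).getD 0, false, rel)
      else none := rfl

theorem K_cons (type : Int) (rel : Bool) (p q : List Char) (ps : List (List Char))
    (t : Int) (cur : List Char) (nc : Nat) :
    K type rel (p :: q :: ps) t cur nc
    = if !PySem.Chars.strIsdigit (cur ++ p) || nc == 2 then none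
      else K type rel (q :: ps) (t * 60 + (PySem.Int.ofChars? (cur ++ p)).getD 0) [] (nc + 1) := rfl

theorem bScan_eq_K (type : Int) (rel : Bool) :
    ∀ (cs : List Char) (t : Int) (cur : List Char) (nc : Nat),
    bScan type rel cs t cur nc = K type rel (splitCh cs) t cur nc := by
  intro cs
  induction cs with
  | nil => intro t cur nc; simp [bScan, splitCh, K]
  | cons c r ih =>
    intro t cur nc
    obtain ⟨q, ps, hps⟩ := List.exists_cons_of_ne_nil (splitCh_ne_nil r)
    by_cases hc : c = ':'
    · subst hc
      have hb : bScan type rel (':' :: r) t cur nc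
          = if !PySem.Chars.strIsdigit cur || nc == 2 then none
            else bScan type rel r (t * 60 + (PySem.Int.ofChars? cur).getD 0) [] (nc + 1) := by
        simp [bScan]
      have hs : splitCh (':' :: r) = [] :: splitCh r := by simp [splitCh]
      rw [hb, hs, hps, K_cons]
      simp only [List.append_nil]
      split
      · rfl
      · rw [ih, hps]
    · have hb : bScan type rel (c :: r) t cur nc = bScan type rel r t (cur ++ [c]) nc := by
        simp [bScan, hc]
      have hs : splitCh (c :: r) = consH [c] (splitCh r) := by simp [splitCh, hc]
      have hcons : consH [c] (splitCh r) = (c :: q) :: ps := by simp [hps, consH]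
      rw [hb, ih, hps, hs, hcons]
      have hap : cur ++ c :: q = (cur ++ [c]) ++ q := by simp
      cases ps with
      | nil => rw [K_single, K_single, hap]
      | cons p2 ps2 => rw [K_cons, K_cons, hap]

-- A's guarded reversed-zip loop over the split components equals K
theorem tailA_eq (type : Int) (rel : Bool) (M : List String) (L : List (List Char))
    (hM : M.map String.toList = L) (hL : L ≠ []) :
    (if M.reverse.length < 4 then
       match aLoop (M.reverse.zip [1, 60, 3600]) 0 with
       | none => none
       | some total_ss => some (type, total_ss, false, rel)
     else (none : Option (Int × Int × Bool × Bool)))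
    = K type rel L 0 [] 0 := by
  subst hM
  match M, hL with
  | [a], _ =>
    simp only [List.reverse_cons, List.reverse_nil, List.nil_append, List.length_cons,
      List.length_nil, List.map_cons, List.map_nil, if_pos (by omega : (1:Nat) < 4),
      List.zip_cons_cons, List.zip_nil_left, aLoop, K, List.nil_append,
      PySem.Str.strIsdigit_eq, PySem.Int.ofStr?.eq_1]
    split_ifs <;> simp
  | [a, b], _ =>
    simp only [List.reverse_cons, List.reverse_nil, List.nil_append, List.cons_append,
      List.length_cons, List.length_nil, List.map_cons, List.map_nil,
      if_pos (by omega : (2:Nat) < 4), List.zip_cons_cons, List.zip_nil_left, aLoop, K,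
      List.nil_append, PySem.Str.strIsdigit_eq, PySem.Int.ofStr?.eq_1]
    split_ifs <;> simp_all
    ring
  | [a, b, c], _ =>
    simp only [List.reverse_cons, List.reverse_nil, List.nil_append, List.cons_append,
      List.length_cons, List.length_nil, List.map_cons, List.map_nil,
      if_pos (by omega : (3:Nat) < 4), List.zip_cons_cons, List.zip_nil_right, aLoop, K,
      List.nil_append, PySem.Str.strIsdigit_eq, PySem.Int.ofStr?.eq_1]
    split_ifs <;> simp_all
    ring
  | a :: b :: c :: d :: rest, _ =>
    rw [if_neg (by simp only [List.length_reverse, List.length_cons]; omega)]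
    simp [K]
  | [], h => exact absurd rfl h

-- string-level facts brought down to the character level
theorem eq_star_iff (s : String) : (s = "*") = (s.toList = ['*']) := by
  have ht : ("*" : String).toList = ['*'] := by decide
  rw [← ht]; exact propext String.toList_inj.symm

theorem eq_neg1_iff (s : String) : (s = "-1") = (s.toList = ['-', '1']) := by
  have ht : ("-1" : String).toList = ['-', '1'] := by decide
  rw [← ht]; exact propext String.toList_inj.symm

theorem startswith_plus_iff (s : String) :
    (PySem.Str.startswith s "+" = true) = (s.toList.take 1 = ['+']) := by
  rw [PySem.Str.startswith_eq, show ("+" : String).toList = ['+'] from by decide,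
    show PySem.Chars.startswith s.toList ['+'] = true ↔ ['+'] <+: s.toList from
      PySem.Chars.startswith_iff _ _]
  rw [List.prefix_iff_eq_take]
  exact propext ⟨fun h => by simpa using h.symm, fun h => by simpa using h.symm⟩

-- the A-side branch tail (split, reverse, guard, loop) rewritten through the bridges
theorem branch_eq (type : Int) (rel : Bool) (body : String) :
    (if (((PySem.Str.split? body ":").getD []).reverse).length < 4 then
       match aLoop ((((PySem.Str.split? body ":").getD []).reverse).zip [1, 60, 3600]) 0 with
       | none => none
       | some total_ss => some (type, total_ss, false, rel)
     else (none : Option (Int × Int × Bool × Bool)))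
    = bScan type rel body.toList 0 [] 0 := by
  rw [bScan_eq_K]
  have hsplit : Option.map (fun x => List.map String.toList x) (PySem.Str.split? body ":")
      = PySem.Chars.split? body.toList ":".toList := PySem.Str.split?_map body ":"
  have hsep : (":" : String).toList = [':'] := by decide
  rw [hsep] at hsplit
  have hch : PySem.Chars.split? body.toList [':'] = some (splitCh body.toList) := by
    simp [PySem.Chars.split?, splitOn_colon]
  rw [hch] at hsplit
  obtain ⟨M, hM, hMt⟩ : ∃ M, PySem.Str.split? body ":" = some M ∧
      M.map String.toList = splitCh body.toList := by
    cases h : PySem.Str.split? body ":" with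
    | none => rw [h] at hsplit; simp at hsplit
    | some M => rw [h] at hsplit; exact ⟨M, rfl, by simpa using hsplit⟩
  rw [hM]
  exact tailA_eq type rel M _ hMt (splitCh_ne_nil _)

-- ===== VERDICT (by name: the statement is the Claim_ definition above) =====
set_option maxHeartbeats 1000000 in
theorem check_timestamp_spec : Claim_equal_check_timestamp := by
  intro type ts _
  show check_timestamp type ts = check_timestamp_alt type ts
  have hstrip : (PySem.Str.strip ts).toList = PySem.Chars.strip ts.toList :=
    PySem.Str.toList_strip ts
  simp only [check_timestamp, check_timestamp_alt, eq_star_iff, eq_neg1_iff,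
    startswith_plus_iff, hstrip]
  by_cases h1 : PySem.Chars.strip ts.toList = ['*']
  · rw [if_pos h1, if_pos h1]
  rw [if_neg h1, if_neg h1]
  by_cases h2 : PySem.Chars.strip ts.toList = ['-', '1']
  · rw [if_pos h2, if_pos h2]
  rw [if_neg h2, if_neg h2]
  by_cases h3 : (PySem.Chars.strip ts.toList).take 1 = ['+']
  · rw [if_pos h3, if_pos h3]
    by_cases h4 : type = 0
    · rw [if_pos h4, if_pos h4]
    · rw [if_neg h4, if_neg h4]
      have hbody : (PySem.Str.slice (PySem.Str.strip ts) (some 1) none).toList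
          = (PySem.Chars.strip ts.toList).tail := by
        rw [PySem.Str.toList_slice, hstrip]
        simp [PySem.Chars.slice, PySem.List.slice_from_one]
      rw [show (PySem.Chars.strip ts.toList).tail
          = (PySem.Str.slice (PySem.Str.strip ts) (some 1) none).toList from hbody.symm]
      exact branch_eq type true (PySem.Str.slice (PySem.Str.strip ts) (some 1) none)
  · rw [if_neg h3, if_neg h3]
    rw [show PySem.Chars.strip ts.toList = (PySem.Str.strip ts).toList from hstrip.symm]
    exact branch_eq type false (PySem.Str.strip ts)
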